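-- pv_equiv track=rewrite | github.com/VeinsOfTheEarth/DeepReservoir | src/deepreservoir/drl/helpers.py | complement_index_ranges
-- ===== SOURCE A (Python) =====
-- def merge_index_ranges(ranges: list[tuple[int, int]]) -> list[tuple[int, int]]:
--     """Merge overlapping/adjacent inclusive index ranges."""
--     if not ranges:
--         return []
--     rr = sorted([(int(a), int(b)) for a, b in ranges], key=lambda x: x[0])
--     merged: list[tuple[int, int]] = []
--     cur_s, cur_e = rr[0]
--     for s, e in rr[1:]:
--         if s <= cur_e + 1:  # overlap or adjacency
--             cur_e = max(cur_e, e)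
--         else:
--             merged.append((cur_s, cur_e))
--             cur_s, cur_e = s, e
--     merged.append((cur_s, cur_e))
--     return merged
--
-- def complement_index_ranges(
--     base: tuple[int, int],
--     excludes: list[tuple[int, int]],
-- ) -> list[tuple[int, int]]:
--     """Return inclusive index ranges inside `base` not covered by `excludes`."""
--     base_s, base_e = int(base[0]), int(base[1])
--     if base_e < base_s:
--         return []
--
--     ex = []
--     for s, e in excludes:
--         s2 = max(int(s), base_s)
--         e2 = min(int(e), base_e)
--         if e2 >= s2:
--             ex.append((s2, e2))
--     ex = merge_index_ranges(ex)
--     if not ex: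
--         return [(base_s, base_e)]
--
--     out: list[tuple[int, int]] = []
--     cur = base_s
--     for s, e in ex:
--         if cur <= s - 1:
--             out.append((cur, s - 1))
--         cur = e + 1
--     if cur <= base_e:
--         out.append((cur, base_e))
--     return out
-- ===== SOURCE B (Python) =====
-- def complement_index_ranges(base, excludes):
--     base_s, base_e = int(base[0]), int(base[1])
--     if base_e < base_s:
--         return []
--     clipped = sorted(
--         [(max(int(s), base_s), min(int(e), base_e)) for s, e in excludes
--          if min(int(e), base_e) >= max(int(s), base_s)],
--         key=lambda x: x[0],
--     )
--     out = []
--     cur = base_s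
--     for s, e in clipped:
--         if s > cur:
--             out.append((cur, s - 1))
--         if e + 1 > cur:
--             cur = e + 1
--     if cur <= base_e:
--         out.append((cur, base_e))
--     return out
-- ===== Notes on version B (the rewrite author's own statement) =====
-- stated objective: simpler
-- what changed: Drops the separate merge_index_ranges pass: B sorts the clipped excludes once and emits the gaps in a single sweep that keeps only the current coverage frontier (cur = max(cur, e+1)), instead of A's merge-then-gap two-pass scheme.
import Mathlib
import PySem

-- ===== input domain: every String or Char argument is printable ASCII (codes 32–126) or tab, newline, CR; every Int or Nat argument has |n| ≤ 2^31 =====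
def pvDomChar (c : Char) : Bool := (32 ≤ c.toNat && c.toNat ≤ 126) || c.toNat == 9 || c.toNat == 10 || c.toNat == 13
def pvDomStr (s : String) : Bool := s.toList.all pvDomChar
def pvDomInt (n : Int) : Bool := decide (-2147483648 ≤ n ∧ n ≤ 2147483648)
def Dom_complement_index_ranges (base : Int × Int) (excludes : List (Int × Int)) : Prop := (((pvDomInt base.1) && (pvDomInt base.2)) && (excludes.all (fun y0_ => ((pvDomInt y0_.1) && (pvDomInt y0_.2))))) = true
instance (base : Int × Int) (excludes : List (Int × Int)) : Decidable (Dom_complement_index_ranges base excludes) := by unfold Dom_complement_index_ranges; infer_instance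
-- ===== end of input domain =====

-- B replaces A's merge-then-gap two-pass scheme by a single sweep over the sorted
-- clipped excludes that tracks only the coverage frontier (objective: simpler).


-- ===== PORT A =====
def merge_index_ranges (ranges : List (Int × Int)) : List (Int × Int) :=
  if ranges = [] then []
  else
    let rr := PySem.List.sorted (ranges.map (fun p => (p.1, p.2))) (fun x => x.1) false
    match rr with
    | [] => []   -- unreachable: rr is a permutation of the nonempty `ranges`
    | (cs, ce) :: rest =>
      let st := rest.foldl
        (fun (st : List (Int × Int) × Int × Int) (p : Int × Int) =>
          if p.1 ≤ st.2.2 + 1 then (st.1, st.2.1, max st.2.2 p.2)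
          else (st.1 ++ [(st.2.1, st.2.2)], p.1, p.2))
        ([], cs, ce)
      st.1 ++ [(st.2.1, st.2.2)]

def complement_index_ranges (base : Int × Int) (excludes : List (Int × Int)) : List (Int × Int) :=
  let base_s := base.1
  let base_e := base.2
  if base_e < base_s then []
  else
    let ex := excludes.foldl
      (fun (acc : List (Int × Int)) (p : Int × Int) =>
        let s2 := max p.1 base_s
        let e2 := min p.2 base_e
        if e2 ≥ s2 then acc ++ [(s2, e2)] else acc) []
    let ex2 := merge_index_ranges ex
    if ex2 = [] then [(base_s, base_e)]
    else
      let st := ex2.foldl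
        (fun (st : List (Int × Int) × Int) (p : Int × Int) =>
          ((if st.2 ≤ p.1 - 1 then st.1 ++ [(st.2, p.1 - 1)] else st.1), p.2 + 1))
        ([], base_s)
      if st.2 ≤ base_e then st.1 ++ [(st.2, base_e)] else st.1

-- ===== PORT B =====
def complement_index_ranges_alt (base : Int × Int) (excludes : List (Int × Int)) : List (Int × Int) :=
  let base_s := base.1
  let base_e := base.2
  if base_e < base_s then []
  else
    let clipped := PySem.List.sorted
      ((excludes.filter (fun p => min p.2 base_e ≥ max p.1 base_s)).map
        (fun p => (max p.1 base_s, min p.2 base_e)))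
      (fun x => x.1) false
    let st := clipped.foldl
      (fun (st : List (Int × Int) × Int) (p : Int × Int) =>
        ((if p.1 > st.2 then st.1 ++ [(st.2, p.1 - 1)] else st.1),
         if p.2 + 1 > st.2 then p.2 + 1 else st.2))
      ([], base_s)
    if st.2 ≤ base_e then st.1 ++ [(st.2, base_e)] else st.1

-- ===== PRECONDITION & SPEC =====
def Spec_complement_index_ranges (base : Int × Int) (excludes : List (Int × Int)) (out : List (Int × Int)) : Prop := out = complement_index_ranges_alt base excludes
instance (base : Int × Int) (excludes : List (Int × Int)) (out : List (Int × Int)) : Decidable (Spec_complement_index_ranges base excludes out) := by unfold Spec_complement_index_ranges; infer_instance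

-- ===== CLAIM (what is proved, stated in full; the proofs are below) =====
def Claim_equal_complement_index_ranges : Prop := ∀ (base : Int × Int) (excludes : List (Int × Int)), Dom_complement_index_ranges base excludes → Spec_complement_index_ranges base excludes (complement_index_ranges base excludes)

-- ===== LEMMAS AND PROOFS =====

-- merge's loop as a structural recursion on the tail of the sorted list
def mergeAux (cs ce : Int) : List (Int × Int) → List (Int × Int)
  | [] => [(cs, ce)]
  | (s, e) :: t => if s ≤ ce + 1 then mergeAux cs (max ce e) t else (cs, ce) :: mergeAux s e t

-- A's gap loop (including the trailing piece) as a recursion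
def gapA (be : Int) : Int → List (Int × Int) → List (Int × Int)
  | cur, [] => if cur ≤ be then [(cur, be)] else []
  | cur, (s, e) :: t => (if cur ≤ s - 1 then [(cur, s - 1)] else []) ++ gapA be (e + 1) t

-- B's sweep loop (including the trailing piece) as a recursion
def gapB (be : Int) : Int → List (Int × Int) → List (Int × Int)
  | cur, [] => if cur ≤ be then [(cur, be)] else []
  | cur, (s, e) :: t =>
      (if s > cur then [(cur, s - 1)] else []) ++ gapB be (if e + 1 > cur then e + 1 else cur) t

theorem mergeAux_ne_nil (cs ce : Int) (t : List (Int × Int)) : mergeAux cs ce t ≠ [] := by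
  induction t generalizing cs ce with
  | nil => simp [mergeAux]
  | cons p t ih =>
    obtain ⟨s, e⟩ := p
    simp only [mergeAux]
    split <;> simp [ih]

theorem merge_foldl_eq_mergeAux (t : List (Int × Int)) :
    ∀ (acc : List (Int × Int)) (cs ce : Int),
    (let st := t.foldl
        (fun (st : List (Int × Int) × Int × Int) (p : Int × Int) =>
          if p.1 ≤ st.2.2 + 1 then (st.1, st.2.1, max st.2.2 p.2)
          else (st.1 ++ [(st.2.1, st.2.2)], p.1, p.2))
        (acc, cs, ce)
     st.1 ++ [(st.2.1, st.2.2)]) = acc ++ mergeAux cs ce t := by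
  induction t with
  | nil => intro acc cs ce; simp [mergeAux]
  | cons p t ih =>
    intro acc cs ce
    obtain ⟨s, e⟩ := p
    simp only [List.foldl_cons, mergeAux]
    by_cases h : s ≤ ce + 1
    · simpa [h] using ih acc cs (max ce e)
    · simpa [h] using ih (acc ++ [(cs, ce)]) s e

theorem gapA_foldl (be : Int) (l : List (Int × Int)) :
    ∀ (acc : List (Int × Int)) (cur : Int),
    (let st := l.foldl
        (fun (st : List (Int × Int) × Int) (p : Int × Int) =>
          ((if st.2 ≤ p.1 - 1 then st.1 ++ [(st.2, p.1 - 1)] else st.1), p.2 + 1))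
        (acc, cur)
     if st.2 ≤ be then st.1 ++ [(st.2, be)] else st.1) = acc ++ gapA be cur l := by
  induction l with
  | nil => intro acc cur; simp only [List.foldl_nil, gapA]; split <;> simp
  | cons p t ih =>
    intro acc cur
    obtain ⟨s, e⟩ := p
    simp only [List.foldl_cons, gapA]
    by_cases h : cur ≤ s - 1
    · simpa [h] using ih (acc ++ [(cur, s - 1)]) (e + 1)
    · simpa [h] using ih acc (e + 1)

theorem gapB_foldl (be : Int) (l : List (Int × Int)) :
    ∀ (acc : List (Int × Int)) (cur : Int),
    (let st := l.foldl
        (fun (st : List (Int × Int) × Int) (p : Int × Int) =>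
          ((if p.1 > st.2 then st.1 ++ [(st.2, p.1 - 1)] else st.1),
           if p.2 + 1 > st.2 then p.2 + 1 else st.2))
        (acc, cur)
     if st.2 ≤ be then st.1 ++ [(st.2, be)] else st.1) = acc ++ gapB be cur l := by
  induction l with
  | nil => intro acc cur; simp only [List.foldl_nil, gapB]; split <;> simp
  | cons p t ih =>
    intro acc cur
    obtain ⟨s, e⟩ := p
    simp only [List.foldl_cons, gapB]
    by_cases h : s > cur
    · simpa [h] using ih (acc ++ [(cur, s - 1)]) (if e + 1 > cur then e + 1 else cur)
    · simpa [h] using ih acc (if e + 1 > cur then e + 1 else cur)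

-- the heart: gaps of the merged list = direct sweep over the sorted clipped list
theorem gapA_cons (be cur s e : Int) (t : List (Int × Int)) :
    gapA be cur ((s, e) :: t) = (if cur ≤ s - 1 then [(cur, s - 1)] else []) ++ gapA be (e + 1) t := rfl

theorem gapB_cons (be cur s e : Int) (t : List (Int × Int)) :
    gapB be cur ((s, e) :: t) =
      (if s > cur then [(cur, s - 1)] else []) ++ gapB be (if e + 1 > cur then e + 1 else cur) t := rfl

theorem emitA_eq (cur s : Int) :
    (if cur ≤ s - 1 then [(cur, s - 1)] else ([] : List (Int × Int)))
      = (if s > cur then [(cur, s - 1)] else []) := by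
  split_ifs <;> first | rfl | omega

theorem gap_merge (be : Int) (t : List (Int × Int)) :
    ∀ (cs ce cur : Int), cur ≤ cs → cs ≤ ce →
    (∀ p ∈ t, p.1 ≤ p.2) →
    List.Pairwise (fun a b : Int × Int => a.1 ≤ b.1) ((cs, ce) :: t) →
    gapA be cur (mergeAux cs ce t) = gapB be cur ((cs, ce) :: t) := by
  induction t with
  | nil =>
    intro cs ce cur h1 h2 _ _
    simp only [mergeAux, gapA, gapB]
    rw [emitA_eq, show (if ce + 1 > cur then ce + 1 else cur) = ce + 1 from by split_ifs <;> omega]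
  | cons p t ih =>
    intro cs ce cur h1 h2 hse hpw
    obtain ⟨s, e⟩ := p
    rw [List.pairwise_cons] at hpw
    obtain ⟨hhd, hpw_t⟩ := hpw
    have hcs_s : cs ≤ s := hhd (s, e) List.mem_cons_self
    have hs_e : s ≤ e := hse (s, e) List.mem_cons_self
    have hse_t : ∀ p ∈ t, p.1 ≤ p.2 := fun p hp => hse p (List.mem_cons_of_mem _ hp)
    simp only [mergeAux]
    by_cases h : s ≤ ce + 1
    · rw [if_pos h]
      rw [List.pairwise_cons] at hpw_t
      rw [ih cs (max ce e) cur h1 (by omega) hse_t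
        (List.pairwise_cons.mpr ⟨fun b hb => hhd b (List.mem_cons_of_mem _ hb), hpw_t.2⟩)]
      rw [gapB_cons, gapB_cons, gapB_cons]
      rw [show (if ce + 1 > cur then ce + 1 else cur) = ce + 1 from by split_ifs <;> omega]
      rw [show (if max ce e + 1 > cur then max ce e + 1 else cur) = max ce e + 1 from by
            have := le_max_left ce e; split_ifs <;> omega]
      rw [show (if s > ce + 1 then [(ce + 1, s - 1)] else ([] : List (Int × Int))) = [] from by
            split_ifs <;> first | rfl | omega]
      rw [show (if e + 1 > ce + 1 then e + 1 else ce + 1) = max ce e + 1 from by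
            split_ifs <;> omega]
      simp
    · rw [if_neg h]
      rw [gapA_cons, gapB_cons, emitA_eq]
      rw [show (if ce + 1 > cur then ce + 1 else cur) = ce + 1 from by split_ifs <;> omega]
      rw [ih s e (ce + 1) (by omega) hs_e hse_t hpw_t]

-- ===== VERDICT (by name: the statement is the Claim_ definition above) =====
theorem complement_index_ranges_spec : Claim_equal_complement_index_ranges := by
  intro base excludes _
  unfold Spec_complement_index_ranges complement_index_ranges complement_index_ranges_alt
  by_cases hbe : base.2 < base.1
  · simp [hbe]
  · simp only [hbe, if_false]
    set bs := base.1
    set be := base.2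
    -- A's clip loop equals B's filter+map clip
    have hclip : excludes.foldl
        (fun (acc : List (Int × Int)) (p : Int × Int) =>
          let s2 := max p.1 bs
          let e2 := min p.2 be
          if e2 ≥ s2 then acc ++ [(s2, e2)] else acc) []
        = (excludes.filter (fun p => min p.2 be ≥ max p.1 bs)).map
            (fun p => (max p.1 bs, min p.2 be)) := by
      simpa using PySem.List.foldl_append_if
        (l := excludes) (acc := [])
        (p := fun p => min p.2 be ≥ max p.1 bs)
        (f := fun p => (max p.1 bs, min p.2 be))
    rw [hclip]
    set ex : List (Int × Int) :=
      (excludes.filter (fun p => min p.2 be ≥ max p.1 bs)).map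
        (fun p => (max p.1 bs, min p.2 be)) with hex
    set rr := PySem.List.sorted ex (fun x : Int × Int => x.1) false with hrr
    have hmapid : ex.map (fun p : Int × Int => (p.1, p.2)) = ex := by
      simp
    by_cases hexnil : ex = []
    · -- no valid excludes: merge gives [], A returns the base range, B sweeps nothing
      have hrrnil : rr = [] := by
        rw [hrr, hexnil]; simp [PySem.List.sorted]
      rw [hrrnil]
      simp [merge_index_ranges, hexnil, List.foldl_nil, not_lt.mp hbe]
    · have hrrne : rr ≠ [] := by
        rw [hrr, Ne, PySem.List.sorted_eq_nil_iff]; exact hexnil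
      obtain ⟨⟨cs, ce⟩, t, hrrcons⟩ : ∃ p t, rr = p :: t := by
        cases hh : rr with
        | nil => exact absurd hh hrrne
        | cons p t => exact ⟨p, t, rfl⟩
      -- facts about the sorted clipped list
      have hmem : ∀ p ∈ rr, bs ≤ p.1 ∧ p.1 ≤ p.2 ∧ p.2 ≤ be := by
        intro p hp
        rw [hrr, PySem.List.mem_sorted, hex] at hp
        simp only [List.mem_map, List.mem_filter] at hp
        obtain ⟨q, ⟨_, hq2⟩, rfl⟩ := hp
        simp only [ge_iff_le, decide_eq_true_eq] at hq2
        refine ⟨le_max_right _ _, hq2, min_le_right _ _⟩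
      have hpw : List.Pairwise (fun a b : Int × Int => a.1 ≤ b.1) rr :=
        PySem.List.sorted_pairwise ex (fun x : Int × Int => x.1)
      have hmerge : merge_index_ranges ex = mergeAux cs ce t := by
        unfold merge_index_ranges
        rw [if_neg hexnil, hmapid, ← hrr, hrrcons]
        simpa using merge_foldl_eq_mergeAux t [] cs ce
      rw [hmerge, if_neg (mergeAux_ne_nil cs ce t)]
      have hA := gapA_foldl be (mergeAux cs ce t) [] bs
      have hB := gapB_foldl be rr [] bs
      simp only [List.nil_append] at hA hB
      rw [hA, hB, hrrcons]
      have hcs : bs ≤ cs := (hmem (cs, ce) (by rw [hrrcons]; exact List.mem_cons_self)).1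
      have hce : cs ≤ ce := (hmem (cs, ce) (by rw [hrrcons]; exact List.mem_cons_self)).2.1
      exact gap_merge be t cs ce bs hcs hce
        (fun p hp => (hmem p (by rw [hrrcons]; exact List.mem_cons_of_mem _ hp)).2.1)
        (by rw [← hrrcons]; exact hpw)
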